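-- pv_equiv track=rewrite | github.com/storrer/udd-programming-practice | wordplay/24_words_without_most_common.py | find_longest_words
-- ===== SOURCE A (Python) =====
-- def contains_no_banned_letters(word: str):
--     banned_letters = "AEIOSHRTN"
--     return all(letter not in banned_letters for letter in word)
--
-- def find_longest_words(array):
--     longest_words = []
--
--     # Read through input word by word
--     for word in array:
--         # Strip white space from words
--         word = word.rstrip()
--         # If word is shorter than max_length (longest words)
--         if longest_words and len(word) < len(longest_words[0]): # guard clause
--             continue
--         if contains_no_banned_letters(word):
--             if not longest_words or len(word) > len(longest_words[0]):
--                 longest_words = [word]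
--             else:
--                 # If it is the same length, i.e. a tie
--                 longest_words.append(word)
--     return longest_words
-- ===== SOURCE B (Python) =====
-- def contains_no_banned_letters(word: str):
--     banned_letters = "AEIOSHRTN"
--     return all(letter not in banned_letters for letter in word)
--
-- def find_longest_words(array):
--     valid = [w for w in (word.rstrip() for word in array)
--              if contains_no_banned_letters(w)]
--     if not valid:
--         return []
--     m = max(len(w) for w in valid)
--     return [w for w in valid if len(w) == m]
-- ===== Notes on version B (the rewrite author's own statement) =====
-- stated objective: simpler
-- what changed: Replaces A's single streaming pass with running-max state, reset and tie-append by a plain filter-then-max-then-filter decomposition over the rstripped words.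
import Mathlib
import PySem

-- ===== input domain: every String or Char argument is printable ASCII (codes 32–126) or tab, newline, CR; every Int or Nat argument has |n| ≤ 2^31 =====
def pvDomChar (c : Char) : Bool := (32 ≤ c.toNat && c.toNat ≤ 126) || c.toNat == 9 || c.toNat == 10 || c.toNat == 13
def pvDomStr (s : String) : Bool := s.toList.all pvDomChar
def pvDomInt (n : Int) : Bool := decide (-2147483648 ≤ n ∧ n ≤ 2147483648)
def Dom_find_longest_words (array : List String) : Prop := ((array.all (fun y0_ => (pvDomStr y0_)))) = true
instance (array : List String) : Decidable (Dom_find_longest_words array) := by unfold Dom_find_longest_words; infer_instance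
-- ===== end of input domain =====

-- B replaces A's streaming running-max pass (reset/append) by a filter, then max, then filter decomposition; same cost, simpler.

-- ===== PORT A =====
-- 'letter in banned_letters' on a single char is membership of that char in the banned string
def contains_no_banned_letters (word : String) : Bool :=
  word.toList.all (fun letter => !(PySem.Chars.isIn [letter] "AEIOSHRTN".toList))

def find_longest_words (array : List String) : List String :=
  array.foldl (fun longest_words word0 =>
    let word := PySem.Str.rstrip word0
    if longest_words ≠ [] ∧ PySem.Str.len word < PySem.Str.len (longest_words.headD "") then
      longest_words
    else if contains_no_banned_letters word then
      if longest_words = [] ∨ PySem.Str.len (longest_words.headD "") < PySem.Str.len word then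
        [word]
      else
        longest_words ++ [word]
    else longest_words) []

-- ===== PORT B =====
def find_longest_words_alt (array : List String) : List String :=
  let valid := (array.map PySem.Str.rstrip).filter contains_no_banned_letters
  match PySem.List.max? (valid.map PySem.Str.len) (fun y => y) with
  | none => []  -- valid is empty
  | some m => valid.filter (fun w => PySem.Str.len w == m)

-- ===== PRECONDITION & SPEC =====
def Spec_find_longest_words (array : List String) (out : List String) : Prop := out = find_longest_words_alt array
instance (array : List String) (out : List String) : Decidable (Spec_find_longest_words array out) := by unfold Spec_find_longest_words; infer_instance

-- ===== CLAIM (what is proved, stated in full; the proofs are below) =====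
def Claim_equal_find_longest_words : Prop := ∀ (array : List String), Dom_find_longest_words array → Spec_find_longest_words array (find_longest_words array)

-- ===== LEMMAS AND PROOFS =====

-- B's core on an already-validated list of words
def pvBest (vs : List String) : List String :=
  match PySem.List.max? (vs.map PySem.Str.len) (fun y => y) with
  | none => []
  | some m => vs.filter (fun w => PySem.Str.len w == m)

-- A's loop body
def pvStep (longest_words : List String) (word0 : String) : List String :=
  let word := PySem.Str.rstrip word0
  if longest_words ≠ [] ∧ PySem.Str.len word < PySem.Str.len (longest_words.headD "") then
    longest_words
  else if contains_no_banned_letters word then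
    if longest_words = [] ∨ PySem.Str.len (longest_words.headD "") < PySem.Str.len word then
      [word]
    else
      longest_words ++ [word]
  else longest_words

theorem pvBest_nil : pvBest [] = [] := rfl

theorem pvMax_append (L : List Int) (x m : Int)
    (h : PySem.List.max? L (fun y => y) = some m) :
    PySem.List.max? (L ++ [x]) (fun y => y) = some (max m x) := by
  cases L with
  | nil => simp [PySem.List.max?] at h
  | cons a t =>
    rw [PySem.List.max?_id_cons] at h
    rw [List.cons_append, PySem.List.max?_id_cons, List.foldl_append]
    simp_all

theorem pvBest_single (x : String) : pvBest [x] = [x] := by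
  unfold pvBest
  rw [List.map_cons, List.map_nil, PySem.List.max?_id_cons, List.foldl_nil]
  simp only [List.filter_cons, List.filter_nil, beq_self_eq_true, if_true]

theorem pvBest_head (vs : List String) (m : Int)
    (h : PySem.List.max? (vs.map PySem.Str.len) (fun y => y) = some m) :
    pvBest vs ≠ [] ∧ PySem.Str.len ((pvBest vs).headD "") = m := by
  have hm := PySem.List.max?_mem h
  simp only [List.mem_map] at hm
  obtain ⟨w, hw, hlw⟩ := hm
  have hBvs : pvBest vs = vs.filter (fun w => PySem.Str.len w == m) := by
    unfold pvBest; rw [h]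
  have hne : vs.filter (fun w => PySem.Str.len w == m) ≠ [] := by
    intro hnil
    have hmem : w ∈ vs.filter (fun w => PySem.Str.len w == m) :=
      List.mem_filter.mpr ⟨hw, beq_iff_eq.mpr hlw⟩
    rw [hnil] at hmem
    exact absurd hmem (List.not_mem_nil)
  rw [hBvs]
  refine ⟨hne, ?_⟩
  cases hf : vs.filter (fun w => PySem.Str.len w == m) with
  | nil => exact absurd hf hne
  | cons h0 t =>
    have hmem : h0 ∈ vs.filter (fun w => PySem.Str.len w == m) := by
      rw [hf]; exact List.mem_cons_self
    have h2 := (List.mem_filter.mp hmem).2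
    rw [List.headD_cons]
    exact beq_iff_eq.mp h2

theorem pvStep_best (vs : List String) (w : String) :
    pvStep (pvBest vs) w =
      pvBest (vs ++ if contains_no_banned_letters (PySem.Str.rstrip w) then [PySem.Str.rstrip w] else []) := by
  by_cases hok : contains_no_banned_letters (PySem.Str.rstrip w)
  · rw [if_pos hok]
    cases hmx : PySem.List.max? (vs.map PySem.Str.len) (fun y => y) with
    | none =>
      rw [PySem.List.max?_eq_none_iff, List.map_eq_nil_iff] at hmx
      subst hmx
      rw [pvBest_nil, List.nil_append, pvBest_single]
      simp only [pvStep]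
      rw [if_neg (by simp), if_pos hok]
      simp
    | some m =>
      obtain ⟨hne, hhead⟩ := pvBest_head vs m hmx
      have hmax : ∀ y ∈ vs, PySem.Str.len y ≤ m := by
        intro y hy
        exact PySem.List.max?_isMax hmx _ (List.mem_map_of_mem hy)
      have hBvs : pvBest vs = vs.filter (fun x => PySem.Str.len x == m) := by
        unfold pvBest; rw [hmx]
      have hBapp : pvBest (vs ++ [PySem.Str.rstrip w]) =
          (vs ++ [PySem.Str.rstrip w]).filter
            (fun x => PySem.Str.len x == max m (PySem.Str.len (PySem.Str.rstrip w))) := by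
        unfold pvBest
        rw [List.map_append, List.map_cons, List.map_nil, pvMax_append _ _ _ hmx]
      rw [hBapp]
      simp only [pvStep]
      rcases lt_trichotomy (PySem.Str.len (PySem.Str.rstrip w)) m with hlt | heq | hgt
      · -- strictly shorter than the current best: A skips it, B's filter drops it
        rw [if_pos ⟨hne, by rw [hhead]; exact hlt⟩]
        have hmm : max m (PySem.Str.len (PySem.Str.rstrip w)) = m := by omega
        have hf' : (PySem.Str.len (PySem.Str.rstrip w) == m) = false :=
          beq_eq_false_iff_ne.mpr (by omega)
        rw [hmm, List.filter_append, hBvs]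
        simp only [List.filter_cons, List.filter_nil, hf', Bool.false_eq_true, if_false,
          List.append_nil]
      · -- a tie: A appends, B's filter keeps both
        rw [if_neg (by push_neg; intro _; rw [hhead]; omega)]
        rw [if_pos hok]
        rw [if_neg (by push_neg; exact ⟨hne, by rw [hhead]; omega⟩)]
        have hmm : max m (PySem.Str.len (PySem.Str.rstrip w)) = m := by omega
        have ht : (PySem.Str.len (PySem.Str.rstrip w) == m) = true := beq_iff_eq.mpr heq
        rw [hmm, List.filter_append, hBvs]
        simp only [List.filter_cons, List.filter_nil, ht, if_true]
      · -- strictly longer: A resets, B's filter keeps only the new word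
        rw [if_neg (by push_neg; intro _; rw [hhead]; omega)]
        rw [if_pos hok]
        rw [if_pos (Or.inr (by rw [hhead]; exact hgt))]
        have hmm : max m (PySem.Str.len (PySem.Str.rstrip w)) = PySem.Str.len (PySem.Str.rstrip w) := by
          omega
        rw [hmm, List.filter_append]
        have h0 : vs.filter (fun x => PySem.Str.len x == PySem.Str.len (PySem.Str.rstrip w)) = [] := by
          rw [List.filter_eq_nil_iff]
          intro y hy
          have hym := hmax y hy
          simp only [beq_iff_eq]
          omega
        rw [h0, List.nil_append]
        simp only [List.filter_cons, List.filter_nil, beq_self_eq_true, if_true]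
  · -- contains a banned letter: A leaves its state, B's valid list is unchanged
    have hok' : contains_no_banned_letters (PySem.Str.rstrip w) = false := by
      simpa using hok
    rw [if_neg (by simp [hok']), List.append_nil]
    simp only [pvStep]
    by_cases hg : pvBest vs ≠ [] ∧
        PySem.Str.len (PySem.Str.rstrip w) < PySem.Str.len ((pvBest vs).headD "")
    · rw [if_pos hg]
    · rw [if_neg hg, if_neg (by simp [hok'])]

theorem pvFold_best (arr : List String) : ∀ vs : List String,
    arr.foldl pvStep (pvBest vs) =
      pvBest (vs ++ (arr.map PySem.Str.rstrip).filter contains_no_banned_letters) := by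
  induction arr with
  | nil => intro vs; simp
  | cons w rest ih =>
    intro vs
    rw [List.foldl_cons, pvStep_best vs w, ih]
    rw [List.append_assoc]
    congr 1
    simp only [List.map_cons, List.filter_cons]
    split <;> simp_all

-- ===== VERDICT (by name: the statement is the Claim_ definition above) =====
theorem find_longest_words_spec : Claim_equal_find_longest_words := by
  intro array _
  have hA : find_longest_words array = List.foldl pvStep [] array := rfl
  have hB : find_longest_words_alt array =
      pvBest ((array.map PySem.Str.rstrip).filter contains_no_banned_letters) := rfl
  have h := pvFold_best array []
  rw [pvBest_nil] at h
  rw [List.nil_append] at h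
  unfold Spec_find_longest_words
  rw [hA, hB, h]
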